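-- pv_equiv track=rewrite | github.com/eliraneli/Node-Activation | Code/code.py | calculate_extrinsic_edges
-- ===== SOURCE A (Python) =====
-- def calculate_extrinsic_edges(num_nodes,nodes_degrees, matrix):
--     extrinsic_edges = []
--     edge_order = []
--     for i in range(0, num_nodes):
--         for j in range(0, nodes_degrees[i]):
--             edge_order.append(matrix[i][j])
--             temp_edges = []
--             for jj in range(0, nodes_degrees[i]):
--                 if jj != j:  # extrinsic information only
--                     temp_edges.append(matrix[i][jj])
--             extrinsic_edges.append(temp_edges)
--     return extrinsic_edges, edge_order
-- ===== SOURCE B (Python) =====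
-- def calculate_extrinsic_edges(num_nodes, nodes_degrees, matrix):
--     extrinsic_edges = []
--     edge_order = []
--     for i in range(num_nodes):
--         d = nodes_degrees[i]
--         rest = matrix[i][:d] if d > 0 else []
--         seen = []
--         while rest:
--             x, rest = rest[0], rest[1:]
--             edge_order.append(x)
--             extrinsic_edges.append(seen + rest)
--             seen = seen + [x]
--     return extrinsic_edges, edge_order
-- ===== Notes on version B (the rewrite author's own statement) =====
-- stated objective: alternative
-- what changed: Replaces the index-based inner re-scan (for jj in range(d): if jj != j) by a zipper-style one-pass sweep over the node's edge list that maintains a growing 'seen' prefix and shrinking 'rest' suffix, emitting seen + rest at each element; no inner loop and no index comparison remain.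
import Mathlib
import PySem

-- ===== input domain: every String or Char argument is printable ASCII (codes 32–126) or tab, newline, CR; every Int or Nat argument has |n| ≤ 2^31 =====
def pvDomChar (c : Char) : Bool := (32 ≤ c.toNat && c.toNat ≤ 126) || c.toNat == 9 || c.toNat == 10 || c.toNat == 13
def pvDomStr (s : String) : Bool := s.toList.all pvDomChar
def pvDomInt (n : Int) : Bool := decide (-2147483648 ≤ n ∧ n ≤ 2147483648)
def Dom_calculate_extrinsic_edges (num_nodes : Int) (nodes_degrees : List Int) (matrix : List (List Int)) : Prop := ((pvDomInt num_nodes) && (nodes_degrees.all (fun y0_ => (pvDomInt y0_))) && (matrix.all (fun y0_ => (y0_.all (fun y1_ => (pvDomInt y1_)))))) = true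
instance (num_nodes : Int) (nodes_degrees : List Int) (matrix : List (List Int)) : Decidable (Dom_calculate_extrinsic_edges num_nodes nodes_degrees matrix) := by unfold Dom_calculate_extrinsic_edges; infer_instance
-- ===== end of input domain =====

-- B replaces the index-based inner re-scan (jj != j) by a zipper sweep over each node's
-- edge list: a growing 'seen' prefix and shrinking 'rest' suffix, emitting seen ++ rest
-- at every element (alternative decomposition, same cost).

-- ===== PORT A =====
def calculate_extrinsic_edges (num_nodes : Int) (nodes_degrees : List Int) (matrix : List (List Int)) : List (List Int) × List Int :=
  (PySem.List.pyRange 0 num_nodes 1).foldl (fun (acc : List (List Int) × List Int) i =>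
    (PySem.List.pyRange 0 (PySem.List.pyGetD nodes_degrees i 0) 1).foldl (fun (acc2 : List (List Int) × List Int) j =>
      let edge_order := acc2.2 ++ [PySem.List.pyGetD (PySem.List.pyGetD matrix i []) j 0]
      let temp_edges := (PySem.List.pyRange 0 (PySem.List.pyGetD nodes_degrees i 0) 1).foldl
        (fun (t : List Int) jj => if jj ≠ j then t ++ [PySem.List.pyGetD (PySem.List.pyGetD matrix i []) jj 0] else t) []
      (acc2.1 ++ [temp_edges], edge_order)) acc) ([], [])

-- ===== PORT B =====
-- the 'while rest:' zipper loop of Source B, structural recursion on rest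
def pvZip : List Int → List Int → List (List Int) × List Int → List (List Int) × List Int
  | _, [], acc => acc
  | seen, x :: tail, acc => pvZip (seen ++ [x]) tail (acc.1 ++ [seen ++ tail], acc.2 ++ [x])

def calculate_extrinsic_edges_alt (num_nodes : Int) (nodes_degrees : List Int) (matrix : List (List Int)) : List (List Int) × List Int :=
  (PySem.List.pyRange 0 num_nodes 1).foldl (fun (acc : List (List Int) × List Int) i =>
    let d := PySem.List.pyGetD nodes_degrees i 0
    let rest := if 0 < d then PySem.List.slice (PySem.List.pyGetD matrix i []) none (some d) else []
    pvZip [] rest acc) ([], [])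

-- ===== PRECONDITION & SPEC =====
-- Pre_ excludes exactly the inputs on which Python A raises IndexError:
-- an i < num_nodes beyond nodes_degrees, or a positive degree beyond matrix's rows or the row's length.
def Pre_calculate_extrinsic_edges (num_nodes : Int) (nodes_degrees : List Int) (matrix : List (List Int)) : Prop :=
  (num_nodes ≤ nodes_degrees.length ∨ num_nodes ≤ 0) ∧
  ∀ i ∈ List.range (min num_nodes.toNat nodes_degrees.length),
    (0 < nodes_degrees.getD i 0 → i < matrix.length ∧ nodes_degrees.getD i 0 ≤ ((matrix.getD i []).length : Int))
instance (num_nodes : Int) (nodes_degrees : List Int) (matrix : List (List Int)) : Decidable (Pre_calculate_extrinsic_edges num_nodes nodes_degrees matrix) := by unfold Pre_calculate_extrinsic_edges; infer_instance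
def pvWitness_calculate_extrinsic_edges : Int × List Int × List (List Int) := (2, [2, 1], [[10, 20], [30]])

def Spec_calculate_extrinsic_edges (num_nodes : Int) (nodes_degrees : List Int) (matrix : List (List Int)) (out : List (List Int) × List Int) : Prop := out = calculate_extrinsic_edges_alt num_nodes nodes_degrees matrix
instance (num_nodes : Int) (nodes_degrees : List Int) (matrix : List (List Int)) (out : List (List Int) × List Int) : Decidable (Spec_calculate_extrinsic_edges num_nodes nodes_degrees matrix out) := by unfold Spec_calculate_extrinsic_edges; infer_instance

-- ===== CLAIM =====
def Claim_equal_calculate_extrinsic_edges : Prop := ∀ (num_nodes : Int) (nodes_degrees : List Int) (matrix : List (List Int)), Dom_calculate_extrinsic_edges num_nodes nodes_degrees matrix → Pre_calculate_extrinsic_edges num_nodes nodes_degrees matrix → Spec_calculate_extrinsic_edges num_nodes nodes_degrees matrix (calculate_extrinsic_edges num_nodes nodes_degrees matrix)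

-- ===== LEMMAS AND PROOFS =====

-- the zipper characterized: it appends the omit-one lists and the whole rest
theorem pvZip_eq (rest seen : List Int) (acc : List (List Int) × List Int) :
    pvZip seen rest acc
      = (acc.1 ++ (List.range rest.length).map
            (fun k => seen ++ rest.take k ++ rest.drop (k + 1)),
         acc.2 ++ rest) := by
  induction rest generalizing seen acc with
  | nil => simp [pvZip]
  | cons x tail ih =>
    rw [pvZip, ih]
    simp only [List.length_cons, List.range_succ_eq_map, List.map_cons, List.map_map]
    simp [Function.comp_def, List.append_assoc]

-- a loop pushing one element to each of two accumulators is a pair of maps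
theorem pv_pair_loop (l : List Int) (tf : Int → List Int) (mf : Int → Int)
    (acc : List (List Int) × List Int) :
    l.foldl (fun acc2 j => (acc2.1 ++ [tf j], acc2.2 ++ [mf j])) acc
      = (acc.1 ++ l.map tf, acc.2 ++ l.map mf) := by
  induction l generalizing acc with
  | nil => simp
  | cons x xs ih => simp [ih]

-- the jj ≠ j filter over range(d) mapped through m is the omit-one take/drop of the mapped range
theorem pv_filter_eq_td (d j : Int) (m : Int → Int) (h0 : 0 ≤ j) (hj : j < d) :
    ((PySem.List.pyRange 0 d 1).filter (fun jj => decide (jj ≠ j))).map m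
      = ((PySem.List.pyRange 0 d 1).map m).take j.toNat
        ++ ((PySem.List.pyRange 0 d 1).map m).drop (j + 1).toNat := by
  have hsplit : PySem.List.pyRange 0 d 1
      = PySem.List.pyRange 0 j 1 ++ (j :: PySem.List.pyRange (j + 1) d 1) := by
    rw [PySem.List.pyRange_one_append 0 j d h0 (le_of_lt hj),
        PySem.List.pyRange_one_cons hj]
  have hlen1 : (PySem.List.pyRange 0 j 1).length = j.toNat := by
    rw [PySem.List.length_pyRange_one]; omega
  have hfilt1 : (PySem.List.pyRange 0 j 1).filter (fun jj => decide (jj ≠ j))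
      = PySem.List.pyRange 0 j 1 := by
    apply List.filter_eq_self.mpr
    intro x hx
    have := (PySem.List.mem_pyRange_one).mp hx
    simp; omega
  have hfilt2 : (PySem.List.pyRange (j + 1) d 1).filter (fun jj => decide (jj ≠ j))
      = PySem.List.pyRange (j + 1) d 1 := by
    apply List.filter_eq_self.mpr
    intro x hx
    have := (PySem.List.mem_pyRange_one).mp hx
    simp; omega
  rw [hsplit]
  rw [List.filter_append, List.filter_cons, hfilt1, hfilt2]
  have hne : (decide (j ≠ j)) = false := by simp
  rw [hne]
  simp only [Bool.false_eq_true, if_false]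
  simp only [List.map_append, List.map_cons]
  have htake : ((PySem.List.pyRange 0 j 1).map m
      ++ (m j :: (PySem.List.pyRange (j + 1) d 1).map m)).take j.toNat
      = (PySem.List.pyRange 0 j 1).map m := by
    apply List.take_left'
    simp [hlen1]
  have hdrop : ((PySem.List.pyRange 0 j 1).map m
      ++ (m j :: (PySem.List.pyRange (j + 1) d 1).map m)).drop (j + 1).toNat
      = (PySem.List.pyRange (j + 1) d 1).map m := by
    have : (PySem.List.pyRange 0 j 1).map m ++ (m j :: (PySem.List.pyRange (j + 1) d 1).map m)
        = ((PySem.List.pyRange 0 j 1).map m ++ [m j]) ++ (PySem.List.pyRange (j + 1) d 1).map m := by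
      simp
    rw [this]
    apply List.drop_left'
    simp [hlen1]; omega
  rw [htake, hdrop]

-- the elements A reads, first (d) of the row, as a take (needs d ≤ row length)
theorem pv_full_take (row : List Int) (d : Int) (hd : d ≤ (row.length : Int)) :
    (PySem.List.pyRange 0 d 1).map (fun k => PySem.List.pyGetD row k 0)
      = row.take d.toNat := by
  rw [PySem.List.pyRange_one, List.map_map]
  apply List.ext_getElem
  · simp; omega
  · intro n h1 h2
    simp only [List.getElem_map, List.getElem_range, Function.comp_apply, List.getElem_take]
    rw [PySem.List.pyGetD_eq_getElem row 0 (by positivity) (by simp at h1 ⊢; omega)]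
    congr 1
    simp at h1; omega

-- one outer-loop step of A equals one of B, given the row-bound Pre_ gives for this i
theorem pv_step (D : Int) (row : List Int)
    (hD : 0 < D → D ≤ (row.length : Int)) (acc : List (List Int) × List Int) :
    (PySem.List.pyRange 0 D 1).foldl (fun acc2 j =>
        let edge_order := acc2.2 ++ [PySem.List.pyGetD row j 0]
        let temp_edges := (PySem.List.pyRange 0 D 1).foldl
          (fun (t : List Int) jj => if jj ≠ j then t ++ [PySem.List.pyGetD row jj 0] else t) []
        (acc2.1 ++ [temp_edges], edge_order)) acc
      = pvZip [] (if 0 < D then PySem.List.slice row none (some D) else []) acc := by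
  by_cases hpos : 0 < D
  · simp only [if_pos hpos]
    rw [PySem.List.slice_to row (le_of_lt hpos), pvZip_eq]
    have hfull := pv_full_take row D (hD hpos)
    simp only [PySem.List.foldl_append_ite, List.nil_append]
    rw [pv_pair_loop _ (fun j => List.map (fun jj => PySem.List.pyGetD row jj 0)
          (List.filter (fun jj => decide (jj ≠ j)) (PySem.List.pyRange 0 D 1)))
        (fun j => PySem.List.pyGetD row j 0)]
    have hlen : (row.take D.toNat).length = D.toNat := by
      have := hD hpos; simp; omega
    rw [hfull, hlen]
    congr 1
    congr 1
    apply List.ext_getElem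
    · rw [List.length_map, List.length_map, PySem.List.length_pyRange_one,
          List.length_range]
      omega
    · intro n h1 h2
      have hn : n < D.toNat := by
        rw [List.length_map, PySem.List.length_pyRange_one] at h1; omega
      simp only [List.getElem_map, List.getElem_range]
      rw [PySem.List.getElem_pyRange_one]
      have h := pv_filter_eq_td D ((0 : Int) + n)
        (fun jj => PySem.List.pyGetD row jj 0) (by omega) (by omega)
      rw [h, hfull]
      congr 1
      · congr 1; omega
      · congr 1; omega
  · rw [PySem.List.pyRange_one_eq_nil (by omega), if_neg hpos]
    simp [pvZip]

-- ===== VERDICT =====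
theorem calculate_extrinsic_edges_spec : Claim_equal_calculate_extrinsic_edges := by
  intro num_nodes nodes_degrees matrix _ hpre
  unfold Spec_calculate_extrinsic_edges calculate_extrinsic_edges calculate_extrinsic_edges_alt
  apply PySem.List.foldl_congr_mem'
  intro i hi acc
  have hmem := PySem.List.mem_pyRange_one.mp hi
  obtain ⟨hbound, hrows⟩ := hpre
  have hi_lt : i.toNat < nodes_degrees.length := by
    rcases hbound with h | h <;> omega
  have hrow := hrows i.toNat (List.mem_range.mpr (by omega))
  apply pv_step
  intro hpos
  rw [PySem.List.pyGetD_of_nonneg nodes_degrees 0 hmem.1] at hpos ⊢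
  rw [PySem.List.pyGetD_of_nonneg matrix [] hmem.1]
  exact (hrow hpos).2
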